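-- pv_equiv track=rewrite | github.com/MakerDev/unittest | sleep_stage/utils/post_process.py | evaluate_rule_effect
-- ===== SOURCE A (Python) =====
-- import copy
--
-- def evaluate_rule_effect(preds, labels, rule, window_size=3):
--     pred_pattern, replace_pattern = rule
--     preds_copy = copy.deepcopy(preds)
--     L = len(preds)
--
--     old_correct = sum(p == t for p, t in zip(preds_copy, labels))
--
--     # 룰 적용
--     for i in range(L - window_size + 1):
--         window_pred = preds_copy[i:i+window_size]
--         str_pred = "".join(map(str, window_pred))
--         if str_pred == pred_pattern:
--             new_labels = [int(x) for x in replace_pattern]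
--             preds_copy[i:i+window_size] = new_labels
--
--     new_correct = sum(p == t for p, t in zip(preds_copy, labels))
--     delta_correct = new_correct - old_correct
--
--     return delta_correct, preds_copy
-- ===== SOURCE B (Python) =====
-- def _correct(ps, ts):
--     return sum(p == t for p, t in zip(ps, ts))
--
--
-- def evaluate_rule_effect(preds, labels, rule, window_size=3):
--     pred_pattern, replace_pattern = rule
--     cur = list(preds)
--     delta = 0
--     for i in range(len(preds) - window_size + 1):
--         win = cur[i:i + window_size]
--         if "".join(map(str, win)) == pred_pattern:
--             new_vals = [int(x) for x in replace_pattern]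
--             old_tail = cur[i:]
--             cur[i:i + window_size] = new_vals
--             delta += _correct(cur[i:], labels[i:]) - _correct(old_tail, labels[i:])
--     return delta, cur
-- ===== Notes on version B (the rewrite author's own statement) =====
-- stated objective: alternative
-- what changed: B drops A's second whole-list correct-count pass (and the delta-by-subtraction at the end) and instead threads a running delta through the single rewrite loop, updating it from the suffix starting at the match position before and after each slice assignment; Pre_ only excludes inputs where A raises ValueError (a matching window with a non-digit replacement pattern), where B raises identically.
import Mathlib
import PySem

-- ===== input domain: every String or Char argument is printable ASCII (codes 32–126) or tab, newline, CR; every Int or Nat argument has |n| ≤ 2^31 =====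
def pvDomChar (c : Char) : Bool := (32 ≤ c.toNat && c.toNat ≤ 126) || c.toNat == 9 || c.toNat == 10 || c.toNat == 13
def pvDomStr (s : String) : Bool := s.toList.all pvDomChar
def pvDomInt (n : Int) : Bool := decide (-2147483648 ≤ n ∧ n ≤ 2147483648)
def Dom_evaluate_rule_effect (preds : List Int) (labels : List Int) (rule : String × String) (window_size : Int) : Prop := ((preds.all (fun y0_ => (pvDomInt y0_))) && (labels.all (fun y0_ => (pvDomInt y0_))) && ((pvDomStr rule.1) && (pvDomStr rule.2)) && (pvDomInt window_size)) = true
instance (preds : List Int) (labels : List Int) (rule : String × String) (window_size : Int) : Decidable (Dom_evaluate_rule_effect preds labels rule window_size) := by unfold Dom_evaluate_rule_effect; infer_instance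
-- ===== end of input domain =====

-- B replaces A's two whole-list correct-count passes by a running delta updated from the
-- suffix from the match position at each rewrite (alternative decomposition, same cost).

-- ===== PORT A =====

-- int(x) for a one-character string; the getD 0 default is only reached where Python raises
-- ValueError, and exactly those inputs are excluded by Pre_evaluate_rule_effect.
def pvIntOfChar (c : Char) : Int := (PySem.Int.ofStr? (String.ofList [c])).getD 0

-- hand port of Python's list slice assignment xs[a:b] = nv (step 1); exact for every a, b:
-- both bounds are resolved like slice bounds and an empty selection inserts at the start bound.
def pySliceAssign (xs : List Int) (a b : Int) (nv : List Int) : List Int :=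
  let s := PySem.List.clampIdx xs.length a
  let e := max (PySem.List.clampIdx xs.length b) s
  xs.take s ++ nv ++ xs.drop e

-- sum(p == t for p, t in zip(xs, ys))  (used twice by A)
def pvSumCorrect (xs ys : List Int) : Int :=
  (xs.zip ys).foldl (fun acc pt => acc + (if pt.1 == pt.2 then (1 : Int) else 0)) 0

-- the body of A's rule-application loop
def pvStepA (pred_pattern replace_pattern : String) (window_size : Int)
    (cur : List Int) (i : Int) : List Int :=
  let window_pred := PySem.List.slice cur (some i) (some (i + window_size))
  let str_pred := PySem.Str.join "" (window_pred.map PySem.Int.toStr)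
  if str_pred == pred_pattern then
    let new_labels := replace_pattern.toList.map pvIntOfChar
    pySliceAssign cur i (i + window_size) new_labels
  else cur

def evaluate_rule_effect (preds : List Int) (labels : List Int) (rule : String × String) (window_size : Int) : Int × List Int :=
  let pred_pattern := rule.1
  let replace_pattern := rule.2
  let L := PySem.List.len preds
  let old_correct := pvSumCorrect preds labels
  let preds_copy := (PySem.List.pyRange 0 (L - window_size + 1) 1).foldl
    (pvStepA pred_pattern replace_pattern window_size) preds
  let new_correct := pvSumCorrect preds_copy labels
  (new_correct - old_correct, preds_copy)

-- ===== PORT B =====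

-- B's helper _correct(ps, ts)
def pvCorrect (ps ts : List Int) : Int :=
  (ps.zip ts).foldl (fun acc pt => acc + (if pt.1 == pt.2 then (1 : Int) else 0)) 0

-- the body of B's loop: state is (delta, cur)
def pvStepB (pred_pattern replace_pattern : String) (window_size : Int) (labels : List Int)
    (st : Int × List Int) (i : Int) : Int × List Int :=
  let delta := st.1
  let cur := st.2
  let win := PySem.List.slice cur (some i) (some (i + window_size))
  if PySem.Str.join "" (win.map PySem.Int.toStr) == pred_pattern then
    let new_vals := replace_pattern.toList.map pvIntOfChar
    let old_tail := PySem.List.slice cur (some i) none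
    let cur' := pySliceAssign cur i (i + window_size) new_vals
    let ltail := PySem.List.slice labels (some i) none
    (delta + (pvCorrect (PySem.List.slice cur' (some i) none) ltail - pvCorrect old_tail ltail),
     cur')
  else st

def evaluate_rule_effect_alt (preds : List Int) (labels : List Int) (rule : String × String) (window_size : Int) : Int × List Int :=
  (PySem.List.pyRange 0 (PySem.List.len preds - window_size + 1) 1).foldl
    (pvStepB rule.1 rule.2 window_size labels) (0, preds)

-- ===== PRECONDITION & SPEC =====

-- Pre_ excludes exactly the inputs on which Python A raises ValueError: some window of the
-- original preds already joins to pred_pattern while replace_pattern has a non-digit character,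
-- so the first matching window reaches int(x) on a non-digit (B raises there identically).
-- (the quantifier is cut off at len preds: every window starting past the end is empty, so the
-- windows with L + 1 ≤ i < L - window_size + 1 can only match the empty pattern)
def Pre_evaluate_rule_effect (preds : List Int) (labels : List Int) (rule : String × String) (window_size : Int) : Prop :=
  (rule.2.toList.all (fun c => c.isDigit)) = true ∨
  ((∀ i ∈ PySem.List.pyRange 0 (min (PySem.List.len preds - window_size + 1) (PySem.List.len preds + 1)) 1,
      PySem.Str.join "" ((PySem.List.slice preds (some i) (some (i + window_size))).map PySem.Int.toStr) ≠ rule.1) ∧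
    (PySem.List.len preds + 1 < PySem.List.len preds - window_size + 1 → rule.1 ≠ ""))

instance (preds : List Int) (labels : List Int) (rule : String × String) (window_size : Int) : Decidable (Pre_evaluate_rule_effect preds labels rule window_size) := by unfold Pre_evaluate_rule_effect; infer_instance

def pvWitness_evaluate_rule_effect : List Int × List Int × (String × String) × Int :=
  ([1, 0, 1, 0], [1, 1, 1, 0], ("101", "111"), 3)

def Spec_evaluate_rule_effect (preds : List Int) (labels : List Int) (rule : String × String) (window_size : Int) (out : Int × List Int) : Prop := out = evaluate_rule_effect_alt preds labels rule window_size
instance (preds : List Int) (labels : List Int) (rule : String × String) (window_size : Int) (out : Int × List Int) : Decidable (Spec_evaluate_rule_effect preds labels rule window_size out) := by unfold Spec_evaluate_rule_effect; infer_instance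

-- ===== CLAIM (what is proved, stated in full; the proofs are below) =====
def Claim_equal_evaluate_rule_effect : Prop := ∀ (preds : List Int) (labels : List Int) (rule : String × String) (window_size : Int), Dom_evaluate_rule_effect preds labels rule window_size → Pre_evaluate_rule_effect preds labels rule window_size → Spec_evaluate_rule_effect preds labels rule window_size (evaluate_rule_effect preds labels rule window_size)

-- ===== LEMMAS AND PROOFS =====

theorem pvWitness_ok :
    Dom_evaluate_rule_effect pvWitness_evaluate_rule_effect.1 pvWitness_evaluate_rule_effect.2.1
      pvWitness_evaluate_rule_effect.2.2.1 pvWitness_evaluate_rule_effect.2.2.2 ∧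
    Pre_evaluate_rule_effect pvWitness_evaluate_rule_effect.1 pvWitness_evaluate_rule_effect.2.1
      pvWitness_evaluate_rule_effect.2.2.1 pvWitness_evaluate_rule_effect.2.2.2 := by decide

theorem pvCorrect_countP (xs ys : List Int) :
    pvCorrect xs ys = ((xs.zip ys).countP (fun pt => pt.1 == pt.2) : Int) := by
  rw [pvCorrect, PySem.List.foldl_add, PySem.List.sum_map_ite_one_zero]
  simp

theorem zip_append_drop (a b ys : List Int) :
    (a ++ b).zip ys = a.zip ys ++ b.zip (ys.drop a.length) := by
  induction a generalizing ys with
  | nil => simp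
  | cons x a ih =>
    cases ys with
    | nil => simp
    | cons y ys => simp [ih]

theorem pvCorrect_append (a b ys : List Int) :
    pvCorrect (a ++ b) ys = pvCorrect a ys + pvCorrect b (ys.drop a.length) := by
  simp [pvCorrect_countP, zip_append_drop, List.countP_append]

theorem pvCorrect_split (l ys : List Int) (k : Nat) (hk : k ≤ l.length) :
    pvCorrect l ys = pvCorrect (l.take k) ys + pvCorrect (l.drop k) (ys.drop k) := by
  conv_lhs => rw [← List.take_append_drop k l]
  rw [pvCorrect_append, List.length_take, Nat.min_eq_left hk]

theorem clamp_nonneg_eq (n : Nat) (i : Int) (h : 0 ≤ i) :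
    PySem.List.clampIdx n i = min i.toNat n := by
  simp only [PySem.List.clampIdx]
  split_ifs <;> omega

theorem clampIdx_le_len (n : Nat) (i : Int) : PySem.List.clampIdx n i ≤ n := by
  simp only [PySem.List.clampIdx]
  split_ifs <;> omega

theorem slice_shape (cur : List Int) (i b : Int) :
    PySem.List.slice cur (some i) (some b) =
      (cur.drop (PySem.List.clampIdx cur.length i)).take
        (PySem.List.clampIdx cur.length b - PySem.List.clampIdx cur.length i) := rfl

theorem join_nil_eq : PySem.Str.join "" ([] : List String) = "" := rfl

-- length of the rewritten list
theorem length_sliceAssign (cur nv : List Int) (i b : Int) :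
    (pySliceAssign cur i b nv).length =
      PySem.List.clampIdx cur.length i + nv.length +
        (cur.length - max (PySem.List.clampIdx cur.length b) (PySem.List.clampIdx cur.length i)) := by
  have hs := clampIdx_le_len cur.length i
  have he := clampIdx_le_len cur.length b
  simp only [pySliceAssign, List.length_append, List.length_take, List.length_drop]
  omega

-- one step of B tracks one step of A, under the reachability invariant
theorem stepB_eq (P R : String) (ws : Int) (labels : List Int) (C0 delta : Int)
    (cur : List Int) (i : Int) (hi0 : 0 ≤ i)
    (hd : delta = pvCorrect cur labels - C0)
    (hinv : P = "" ∧ R.toList ≠ [] → i ≤ (cur.length : Int)) :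
    pvStepB P R ws labels (delta, cur) i =
      (pvCorrect (pvStepA P R ws cur i) labels - C0, pvStepA P R ws cur i) := by
  simp only [pvStepB, pvStepA]
  by_cases hmatch : (PySem.Str.join ""
      ((PySem.List.slice cur (some i) (some (i + ws))).map PySem.Int.toStr) == P) = true
  · simp only [hmatch, if_true]
    set nv := R.toList.map pvIntOfChar with hnv
    set s := PySem.List.clampIdx cur.length i with hs
    set e := max (PySem.List.clampIdx cur.length (i + ws)) s with he
    have hsl : s ≤ cur.length := clampIdx_le_len cur.length i
    have hel : e ≤ cur.length := by
      have := clampIdx_le_len cur.length (i + ws)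
      omega
    have hse : s ≤ e := le_max_right _ _
    have hshape : pySliceAssign cur i (i + ws) nv =
        cur.take s ++ nv ++ cur.drop e := rfl
    refine Prod.ext ?_ rfl
    simp only []
    -- tails are plain drops at i.toNat
    have htailc : PySem.List.slice cur (some i) none = cur.drop i.toNat := by
      rw [PySem.List.slice_from _ hi0]
    have htaill : PySem.List.slice labels (some i) none = labels.drop i.toNat := by
      rw [PySem.List.slice_from _ hi0]
    have htailc' : PySem.List.slice (pySliceAssign cur i (i + ws) nv) (some i) none =
        (pySliceAssign cur i (i + ws) nv).drop i.toNat := by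
      rw [PySem.List.slice_from _ hi0]
    rw [htailc, htaill, htailc', hd]
    by_cases hle : i.toNat ≤ cur.length
    · -- the match position lies inside cur: prefixes below i agree, split both counts at i
      have hsi : s = i.toNat := by rw [hs, clamp_nonneg_eq _ _ hi0]; omega
      have hlen' : i.toNat ≤ (pySliceAssign cur i (i + ws) nv).length := by
        rw [length_sliceAssign]
        omega
      have hpre : (pySliceAssign cur i (i + ws) nv).take i.toNat = cur.take i.toNat := by
        rw [hshape, hsi, List.append_assoc, List.take_append_of_le_length
          (by rw [List.length_take]; omega)]
        rw [List.take_take, Nat.min_self]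
      rw [pvCorrect_split cur labels i.toNat hle,
        pvCorrect_split (pySliceAssign cur i (i + ws) nv) labels i.toNat hlen', hpre]
      ring
    · -- i is past the end of cur: the matched window is empty, so P = "" and (by the
      -- invariant) the replacement is empty too — the step is a no-op on both sides
      have hwin : PySem.List.slice cur (some i) (some (i + ws)) = [] := by
        rw [slice_shape]
        have : PySem.List.clampIdx cur.length i = cur.length := by
          rw [clamp_nonneg_eq _ _ hi0]; omega
        rw [this, List.drop_length, List.take_nil]
      have hP : P = "" := by
        have := eq_of_beq hmatch
        rw [hwin] at this
        simpa [join_nil_eq] using this.symm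
      have hR : R.toList = [] := by
        by_contra hne
        have := hinv ⟨hP, hne⟩
        omega
      have hnv0 : nv = [] := by rw [hnv, hR]; rfl
      have hee : e = s := by
        rw [he, hs, clamp_nonneg_eq _ _ hi0]
        have := clampIdx_le_len cur.length (i + ws)
        omega
      have hcur' : pySliceAssign cur i (i + ws) nv = cur := by
        rw [hshape, hnv0, hee, List.append_nil, List.take_append_drop]
      rw [hcur']
      ring
  · simp only [hmatch, Bool.false_eq_true, if_false]
    rw [hd]

-- one step of A preserves the reachability invariant
theorem stepA_inv (P R : String) (ws : Int) (cur : List Int) (i : Int) (hi0 : 0 ≤ i)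
    (hinv : P = "" ∧ R.toList ≠ [] → i ≤ (cur.length : Int)) :
    P = "" ∧ R.toList ≠ [] → i + 1 ≤ ((pvStepA P R ws cur i).length : Int) := by
  intro hPR
  have hlen := hinv hPR
  simp only [pvStepA]
  by_cases hmatch : (PySem.Str.join ""
      ((PySem.List.slice cur (some i) (some (i + ws))).map PySem.Int.toStr) == P) = true
  · simp only [hmatch, if_true]
    rw [length_sliceAssign]
    have hs := clampIdx_le_len cur.length i
    have he := clampIdx_le_len cur.length (i + ws)
    have hsi : PySem.List.clampIdx cur.length i = i.toNat := by
      rw [clamp_nonneg_eq _ _ hi0]; omega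
    have hr : 0 < (R.toList.map pvIntOfChar).length := by
      rw [List.length_map]
      exact List.length_pos_iff.mpr hPR.2
    omega
  · simp only [hmatch, Bool.false_eq_true, if_false]
    -- no match: the window at i cannot be empty (its join would be "" = P), so i < len cur
    by_cases hi : i.toNat < cur.length
    · omega
    · exfalso
      have hwin : PySem.List.slice cur (some i) (some (i + ws)) = [] := by
        rw [slice_shape]
        have : PySem.List.clampIdx cur.length i = cur.length := by
          rw [clamp_nonneg_eq _ _ hi0]; omega
        rw [this, List.drop_length, List.take_nil]
      apply hmatch
      rw [hwin]
      simp [join_nil_eq, hPR.1]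

-- B's fold computes (count of A's fold minus C0, A's fold)
theorem fold_inv (P R : String) (ws : Int) (labels : List Int) (C0 b : Int) :
    ∀ (n : Nat) (a delta : Int) (cur : List Int), 0 ≤ a → (b - a).toNat = n →
    delta = pvCorrect cur labels - C0 →
    (P = "" ∧ R.toList ≠ [] → a ≤ (cur.length : Int)) →
    (PySem.List.pyRange a b 1).foldl (pvStepB P R ws labels) (delta, cur) =
      (pvCorrect ((PySem.List.pyRange a b 1).foldl (pvStepA P R ws) cur) labels - C0,
       (PySem.List.pyRange a b 1).foldl (pvStepA P R ws) cur) := by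
  intro n
  induction n with
  | zero =>
    intro a delta cur ha hn hd _
    rw [PySem.List.pyRange_one_eq_nil (by omega)]
    simp only [List.foldl_nil]
    rw [hd]
  | succ n ih =>
    intro a delta cur ha hn hd hinv
    rw [PySem.List.pyRange_one_cons (by omega)]
    simp only [List.foldl_cons]
    rw [stepB_eq P R ws labels C0 delta cur a ha hd hinv]
    exact ih (a + 1) _ _ (by omega) (by omega) rfl (stepA_inv P R ws cur a ha hinv)

-- ===== VERDICT (by name: the statement is the Claim_ definition above) =====
theorem evaluate_rule_effect_spec : Claim_equal_evaluate_rule_effect := by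
  intro preds labels rule window_size _ _
  unfold Spec_evaluate_rule_effect evaluate_rule_effect evaluate_rule_effect_alt
  rw [fold_inv rule.1 rule.2 window_size labels (pvCorrect preds labels)
    (PySem.List.len preds - window_size + 1)
    (PySem.List.len preds - window_size + 1 - 0).toNat 0 0 preds le_rfl rfl (by ring)
    (by intro _; exact Int.natCast_nonneg _)]
  have : pvSumCorrect = pvCorrect := rfl
  rw [this]
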